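-- pv_equiv track=rewrite | github.com/tamasakian/minigen | src/minigen/core/blast.py | identify_qseqid_with_tag_only
-- ===== SOURCE A (Python) =====
-- from collections import defaultdict
--
-- def get_tag(seqid: str) -> str | None:
--     if "|" not in seqid:
--         return None
--     return seqid.split("|")[-1]
--
-- def identify_qseqid_with_tag_only(records: list[dict], tag_list: list[str]) -> list[str]:
--     allowed = set(tag_list)
--     qry2tags = defaultdict(list)
--     for record in records:
--         qseqid = record["qseqid"]
--         rseqid = record["rseqid"]
--         tag = get_tag(rseqid)
--         qry2tags[qseqid].append(tag)
--     matched = []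
--     for qseqid, tags in qry2tags.items():
--         if not all(tag in allowed for tag in tags):
--             continue
--         matched.append(qseqid)
--     return matched
-- ===== SOURCE B (Python) =====
-- def identify_qseqid_with_tag_only(records, tag_list):
--     allowed = set(tag_list)
--     valid = {}
--     for record in records:
--         qseqid = record["qseqid"]
--         rseqid = record["rseqid"]
--         ok = "|" in rseqid and rseqid.split("|")[-1] in allowed
--         valid[qseqid] = valid.get(qseqid, True) and ok
--     return [qseqid for qseqid, ok in valid.items() if ok]
-- ===== Notes on version B (the rewrite author's own statement) =====
-- stated objective: simpler
-- what changed: B makes a single pass keeping one running boolean per qseqid in an insertion-ordered dict (valid[q] = valid.get(q, True) and ok) instead of materializing every qseqid's full tag list and re-scanning it in a second grouping-then-filter pass.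
import Mathlib
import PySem

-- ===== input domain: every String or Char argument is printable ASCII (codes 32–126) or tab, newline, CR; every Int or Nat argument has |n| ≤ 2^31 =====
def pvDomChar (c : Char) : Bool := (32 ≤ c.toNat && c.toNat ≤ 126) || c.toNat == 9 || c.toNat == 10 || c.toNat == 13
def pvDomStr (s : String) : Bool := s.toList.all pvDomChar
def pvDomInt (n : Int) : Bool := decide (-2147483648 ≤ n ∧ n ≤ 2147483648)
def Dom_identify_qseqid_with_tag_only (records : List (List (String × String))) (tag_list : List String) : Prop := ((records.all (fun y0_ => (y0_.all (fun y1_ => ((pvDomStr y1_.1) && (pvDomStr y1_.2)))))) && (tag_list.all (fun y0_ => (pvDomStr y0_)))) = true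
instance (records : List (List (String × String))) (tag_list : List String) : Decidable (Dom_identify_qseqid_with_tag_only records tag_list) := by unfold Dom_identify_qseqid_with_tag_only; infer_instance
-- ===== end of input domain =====

-- B replaces A's group-tags-then-filter two-pass scheme with a single pass keeping one running
-- boolean per qseqid (objective: simpler).

-- ===== PORT A =====
-- get_tag: None iff "|" not in seqid, else seqid.split("|")[-1]
def pvGetTag (seqid : String) : Option String :=
  if PySem.Str.isIn "|" seqid = false then none
  else PySem.List.pyGet? ((PySem.Str.split? seqid "|").getD []) (-1)

def identify_qseqid_with_tag_only (records : List (List (String × String))) (tag_list : List String) : List String :=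
  let allowed := PySem.Set.ofList tag_list
  let qry2tags : PySem.Dict String (List (Option String)) :=
    records.foldl (fun d record =>
      let qseqid := (PySem.Dict.mk record).getD "qseqid" ""   -- total under Pre_ (key present)
      let rseqid := (PySem.Dict.mk record).getD "rseqid" ""   -- total under Pre_ (key present)
      let tag := pvGetTag rseqid
      d.insert qseqid (d.getD qseqid [] ++ [tag])) PySem.Dict.empty
  qry2tags.items.foldl (fun matched p =>
    if p.2.all (fun tag => match tag with
                           | some t => PySem.Set.contains allowed t
                           | none => false)
    then matched ++ [p.1] else matched) []

-- ===== PORT B =====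
def identify_qseqid_with_tag_only_alt (records : List (List (String × String))) (tag_list : List String) : List String :=
  let allowed := PySem.Set.ofList tag_list
  let valid : PySem.Dict String Bool :=
    records.foldl (fun v record =>
      let qseqid := (PySem.Dict.mk record).getD "qseqid" ""   -- total under Pre_ (key present)
      let rseqid := (PySem.Dict.mk record).getD "rseqid" ""   -- total under Pre_ (key present)
      let ok := PySem.Str.isIn "|" rseqid &&
        (match PySem.List.pyGet? ((PySem.Str.split? rseqid "|").getD []) (-1) with
         | some t => PySem.Set.contains allowed t
         | none => false)
      v.insert qseqid (v.getD qseqid true && ok)) PySem.Dict.empty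
  (valid.items.filter (fun p => p.2)).map (fun p => p.1)

-- ===== PRECONDITION & SPEC =====
-- Pre_ excludes exactly the inputs where A raises KeyError: some record lacks key "qseqid" or "rseqid".
def Pre_identify_qseqid_with_tag_only (records : List (List (String × String))) (tag_list : List String) : Prop :=
  ∀ r ∈ records, (PySem.Dict.mk r).contains "qseqid" = true ∧ (PySem.Dict.mk r).contains "rseqid" = true
instance (records : List (List (String × String))) (tag_list : List String) : Decidable (Pre_identify_qseqid_with_tag_only records tag_list) := by unfold Pre_identify_qseqid_with_tag_only; infer_instance

def pvWitness_identify_qseqid_with_tag_only : (List (List (String × String))) × List String :=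
  ([[("qseqid", "q1"), ("rseqid", "a|x")], [("qseqid", "q2"), ("rseqid", "|")]], ["x", ""])

def Spec_identify_qseqid_with_tag_only (records : List (List (String × String))) (tag_list : List String) (out : List String) : Prop := out = identify_qseqid_with_tag_only_alt records tag_list
instance (records : List (List (String × String))) (tag_list : List String) (out : List String) : Decidable (Spec_identify_qseqid_with_tag_only records tag_list out) := by unfold Spec_identify_qseqid_with_tag_only; infer_instance

-- ===== CLAIM (what is proved, stated in full; the proofs are below) =====
def Claim_equal_identify_qseqid_with_tag_only : Prop := ∀ (records : List (List (String × String))) (tag_list : List String), Dom_identify_qseqid_with_tag_only records tag_list → Pre_identify_qseqid_with_tag_only records tag_list → Spec_identify_qseqid_with_tag_only records tag_list (identify_qseqid_with_tag_only records tag_list)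

-- ===== LEMMAS AND PROOFS =====

-- A's per-tag membership test, as a named predicate (proof-side only)
def pvF (allowed : PySem.Set String) (tag : Option String) : Bool :=
  match tag with
  | some t => PySem.Set.contains allowed t
  | none => false

-- eta lemma: A's inline membership lambda is pvF
lemma pvF_eta (allowed : PySem.Set String) :
    (fun tag => match tag with
                | some t => PySem.Set.contains allowed t
                | none => false) = pvF allowed := rfl

-- B's inline ok-test equals A's test applied to get_tag
lemma pvOk_eq (allowed : PySem.Set String) (r : String) :
    (PySem.Str.isIn "|" r &&
      (match PySem.List.pyGet? ((PySem.Str.split? r "|").getD []) (-1) with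
       | some t => PySem.Set.contains allowed t
       | none => false))
    = pvF allowed (pvGetTag r) := by
  unfold pvF pvGetTag
  cases h : PySem.Str.isIn "|" r <;> simp [h]

-- pointwise image of a dict's values
def pvMap (g : List (Option String) → Bool) (d : PySem.Dict String (List (Option String))) : PySem.Dict String Bool :=
  PySem.Dict.mk (d.items.map (fun p => (p.1, g p.2)))

lemma pvMap_get? (g : List (Option String) → Bool) (d : PySem.Dict String (List (Option String))) (k : String) :
    (pvMap g d).get? k = (d.get? k).map g := by
  cases d with
  | mk l =>
    induction l with
    | nil => rfl
    | cons p t ih =>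
      cases p with
      | mk a b =>
        simp only [pvMap, List.map_cons, PySem.Dict.get?_mk_cons]
        split_ifs with h
        · simp
        · simpa [pvMap] using ih

lemma pvMap_contains (g : List (Option String) → Bool) (d : PySem.Dict String (List (Option String))) (k : String) :
    (pvMap g d).contains k = d.contains k := by
  rw [PySem.Dict.contains_eq_isSome_get?, PySem.Dict.contains_eq_isSome_get?, pvMap_get?]
  cases d.get? k <;> rfl

lemma pvMap_getD (g : List (Option String) → Bool) (d : PySem.Dict String (List (Option String))) (k : String) :
    (pvMap g d).getD k (g []) = g (d.getD k []) := by
  rw [PySem.Dict.getD_eq_get?_getD, PySem.Dict.getD_eq_get?_getD, pvMap_get?]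
  cases d.get? k <;> rfl

lemma pvMap_insert (g : List (Option String) → Bool) (d : PySem.Dict String (List (Option String))) (k : String) (v : List (Option String)) :
    pvMap g (d.insert k v) = (pvMap g d).insert k (g v) := by
  have hc : (pvMap g d).contains k = d.contains k := pvMap_contains g d k
  apply PySem.Dict.ext
  show (pvMap g (d.insert k v)).items = ((pvMap g d).insert k (g v)).items
  rw [PySem.Dict.items_insert, hc]
  by_cases h : d.contains k = true
  · rw [if_pos h]
    simp only [pvMap, PySem.Dict.items_insert, if_pos h, List.map_map]
    apply List.map_congr_left
    intro p _
    by_cases hp : p.1 = k <;> simp [hp]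
  · rw [if_neg h]
    simp [pvMap, PySem.Dict.items_insert, h]

-- the single-pass loop of B computes the boolean image of A's grouping loop
lemma pvLoop (allowed : PySem.Set String) (records : List (List (String × String)))
    (dA : PySem.Dict String (List (Option String))) :
    records.foldl (fun v record =>
      let qseqid := (PySem.Dict.mk record).getD "qseqid" ""
      let rseqid := (PySem.Dict.mk record).getD "rseqid" ""
      let ok := PySem.Str.isIn "|" rseqid &&
        (match PySem.List.pyGet? ((PySem.Str.split? rseqid "|").getD []) (-1) with
         | some t => PySem.Set.contains allowed t
         | none => false)
      v.insert qseqid (v.getD qseqid true && ok)) (pvMap (fun ts => ts.all (pvF allowed)) dA)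
    = pvMap (fun ts => ts.all (pvF allowed))
        (records.foldl (fun d record =>
          let qseqid := (PySem.Dict.mk record).getD "qseqid" ""
          let rseqid := (PySem.Dict.mk record).getD "rseqid" ""
          let tag := pvGetTag rseqid
          d.insert qseqid (d.getD qseqid [] ++ [tag])) dA) := by
  induction records generalizing dA with
  | nil => rfl
  | cons record rest ih =>
    simp only [List.foldl_cons]
    rw [← ih]
    congr 1
    rw [pvOk_eq]
    have hg : (pvMap (fun ts => ts.all (pvF allowed)) dA).getD
        ((PySem.Dict.mk record).getD "qseqid" "") true
        = (dA.getD ((PySem.Dict.mk record).getD "qseqid" "") []).all (pvF allowed) := by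
      simpa using pvMap_getD (fun ts => ts.all (pvF allowed)) dA ((PySem.Dict.mk record).getD "qseqid" "")
    rw [hg, pvMap_insert]
    congr 1
    simp [List.all_append]

-- ===== VERDICT (by name: the statement is the Claim_ definition above) =====
theorem identify_qseqid_with_tag_only_spec : Claim_equal_identify_qseqid_with_tag_only := by
  intro records tag_list _ _
  unfold Spec_identify_qseqid_with_tag_only
  unfold identify_qseqid_with_tag_only identify_qseqid_with_tag_only_alt
  simp only []
  rw [show (PySem.Dict.empty : PySem.Dict String Bool)
      = pvMap (fun ts => ts.all (pvF (PySem.Set.ofList tag_list))) PySem.Dict.empty from rfl,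
    pvLoop]
  generalize (records.foldl _ (PySem.Dict.empty : PySem.Dict String (List (Option String)))) = dA
  rw [pvF_eta, PySem.List.foldl_append_if
      (p := fun p : String × List (Option String) => p.2.all (pvF (PySem.Set.ofList tag_list)))
      (f := fun p => p.1) dA.items []]
  simp only [pvMap, List.filter_map, List.map_map, List.nil_append]
  rfl
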